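-- pv_equiv track=rewrite | github.com/maMykola/hyperskill-regex-engine | regex.py | string_regex
-- ===== SOURCE A (Python) =====
-- def char_regex(pattern, char):
--     if pattern == "":
--         return True
--     elif pattern == ".":
--         return len(char) == 1
--     else:
--         return char == pattern
--
-- def string_regex(regex, text):
--     if regex == "":
--         return True
--     elif len(regex) > len(text):
--         return False
--     elif not char_regex(regex[0], text[0]):
--         return False
--     else:
--         return string_regex(regex[1:], text[1:])
-- ===== SOURCE B (Python) =====
-- def string_regex(regex, text):
--     if len(regex) > len(text):
--         return False
--     return all(p == '.' or p == t for p, t in zip(regex, text))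
-- ===== Notes on version B (the rewrite author's own statement) =====
-- stated objective: faster
-- what changed: replaces the recursion that slices both strings at every step with one length check plus a single linear pass over zipped characters
import Mathlib
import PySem

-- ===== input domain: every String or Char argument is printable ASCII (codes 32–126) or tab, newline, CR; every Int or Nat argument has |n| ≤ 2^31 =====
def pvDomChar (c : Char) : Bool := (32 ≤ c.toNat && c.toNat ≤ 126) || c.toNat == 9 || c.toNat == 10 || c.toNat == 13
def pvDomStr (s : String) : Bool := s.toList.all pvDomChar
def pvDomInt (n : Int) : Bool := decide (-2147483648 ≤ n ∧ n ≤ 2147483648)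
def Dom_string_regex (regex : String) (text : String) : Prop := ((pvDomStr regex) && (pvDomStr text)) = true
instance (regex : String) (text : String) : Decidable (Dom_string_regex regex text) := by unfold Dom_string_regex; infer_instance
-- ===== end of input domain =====

-- B replaces A's recursive double slicing with one length check and a single linear pass over zipped characters (asymptotically faster).

-- ===== PORT A =====
-- char_regex(pattern, char): pattern/char are one-character strings here, ported as List Char
def charRegexA (pattern : List Char) (ch : List Char) : Bool :=
  if pattern = [] then true
  else if pattern = ['.'] then ch.length == 1
  else ch == pattern

-- string_regex recursion on the character lists; regex[0]/text[0] are the heads, regex[1:]/text[1:] the tails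
def stringRegexA : List Char → List Char → Bool
  | [], _ => true
  | rc :: rs, t =>
      if (rc :: rs).length > t.length then false
      else
        match t with
        | [] => false  -- unreachable: length check above already failed
        | tc :: ts =>
            if !charRegexA [rc] [tc] then false
            else stringRegexA rs ts

def string_regex (regex : String) (text : String) : Bool :=
  stringRegexA regex.toList text.toList

-- ===== PORT B =====
def string_regex_alt (regex : String) (text : String) : Bool :=
  if regex.toList.length > text.toList.length then false
  else (regex.toList.zip text.toList).all (fun pt => pt.1 == '.' || pt.1 == pt.2)

-- ===== PRECONDITION & SPEC =====
def Spec_string_regex (regex : String) (text : String) (out : Bool) : Prop := out = string_regex_alt regex text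
instance (regex : String) (text : String) (out : Bool) : Decidable (Spec_string_regex regex text out) := by unfold Spec_string_regex; infer_instance

-- ===== CLAIM (what is proved, stated in full; the proofs are below) =====
def Claim_equal_string_regex : Prop := ∀ (regex : String) (text : String), Dom_string_regex regex text → Spec_string_regex regex text (string_regex regex text)

-- ===== LEMMAS AND PROOFS =====
theorem stringRegexA_eq (r : List Char) : ∀ t : List Char,
    stringRegexA r t =
      (if r.length > t.length then false
       else (r.zip t).all (fun pt => pt.1 == '.' || pt.1 == pt.2)) := by
  induction r with
  | nil => intro t; simp [stringRegexA]
  | cons rc rs ih =>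
      intro t
      cases t with
      | nil => simp [stringRegexA]
      | cons tc ts =>
          simp only [stringRegexA, charRegexA, ih ts, List.length_cons, List.zip_cons_cons,
            List.all_cons]
          by_cases hlen : rs.length + 1 > ts.length + 1
          · simp [hlen]
          · have hlen' : ¬ rs.length > ts.length := by omega
            simp only [if_neg hlen, if_neg hlen', gt_iff_lt]
            by_cases hdot : rc = '.'
            · simp [hdot]
            · have h1 : ([rc] : List Char) ≠ [] := by simp
              have h2 : ([rc] : List Char) ≠ ['.'] := by simp [hdot]
              simp only [if_neg h1, if_neg h2]
              by_cases heq : tc = rc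
              · subst heq; simp [BEq.comm]
              · have : rc ≠ tc := fun h => heq h.symm
                simp [heq, this, hdot]

-- ===== VERDICT (by name: the statement is the Claim_ definition above) =====
theorem string_regex_spec : Claim_equal_string_regex := by
  intro regex text _
  unfold Spec_string_regex string_regex string_regex_alt
  exact stringRegexA_eq regex.toList text.toList
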